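-- pv_equiv track=rewrite | github.com/981377660LMT/algorithm-study | 22_专题/前缀与差分/差分数组/区间操作/Longest Equivalent Sublist After K Increments-双指针.py | solve
-- ===== SOURCE A (Python) =====
-- from collections import deque
-- from typing import List
--
-- def solve(nums: List[int], k: int):
--     """monoQueue AC"""
--     # 我们需要维护窗口内改变代价最大的那一个元素,可以用monoQueue,也可以sortedLst
--     window = deque()
--     res = 0
--
--     left = 0
--     curSum = 0
--     for right, num in enumerate(nums):
--         curSum += num
--         while window and nums[window[-1]] < num:
--             window.pop()
--         window.append(right)
--
--         # 统一为max的代价超出了,滑窗左移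
--         while window and (right - left + 1) * nums[window[0]] - curSum > k:
--             curSum -= nums[left]
--             if window and window[0] == left:
--                 window.popleft()
--             left += 1
--
--         res = max(res, right - left + 1)
--
--     return res
-- ===== SOURCE B (Python) =====
-- from typing import List
--
-- def solve(nums: List[int], k: int):
--     """Brute force over all windows: the answer is the longest window whose
--     equalization cost (len * windowMax - windowSum) is at most k, so check every
--     window, maintaining the running max and sum while extending right.  The cost
--     only grows as the window extends (the max can only grow), so the inner loop
--     stops at the first window that exceeds k."""
--     best = 0
--     for left in range(len(nums)):
--         curMax = nums[left]
--         curSum = 0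
--         for right in range(left, len(nums)):
--             v = nums[right]
--             curMax = max(curMax, v)
--             curSum += v
--             if (right - left + 1) * curMax - curSum <= k:
--                 best = max(best, right - left + 1)
--             else:
--                 break
--     return best
-- ===== Notes on version B (the rewrite author's own statement) =====
-- stated objective: simpler
-- what changed: A's sliding window with a monotonic deque is replaced by a brute-force double loop that checks every window while maintaining a running max and sum, breaking out of the inner loop at the first window whose cost len*max-sum exceeds k (the cost only grows as the window extends).
import Mathlib
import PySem

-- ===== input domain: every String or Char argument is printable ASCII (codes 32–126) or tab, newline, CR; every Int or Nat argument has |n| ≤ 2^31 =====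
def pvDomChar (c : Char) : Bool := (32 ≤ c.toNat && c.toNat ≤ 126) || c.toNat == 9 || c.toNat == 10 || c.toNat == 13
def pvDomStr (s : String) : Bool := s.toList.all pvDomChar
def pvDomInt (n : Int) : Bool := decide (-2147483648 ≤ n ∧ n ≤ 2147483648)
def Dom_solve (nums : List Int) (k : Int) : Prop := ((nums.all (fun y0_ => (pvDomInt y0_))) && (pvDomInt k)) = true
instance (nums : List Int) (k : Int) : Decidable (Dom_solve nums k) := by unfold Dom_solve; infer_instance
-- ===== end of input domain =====

-- B drops A's sliding window and monotonic deque entirely: it checks every window with a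
-- brute-force double loop (running max and sum while extending right); objective: simpler, not faster.

-- ===== PORT A =====
-- The Python deque of indices is stored back-first as a List Nat: head = window[-1],
-- getLast? = window[0], cons = append, dropLast = popleft.  Indices are nonnegative Python
-- ints, kept as Nat; nums[j] is ported as nums.getD j 0, exact because every index the Python
-- loop reads is in range (deque entries lie in [left, right] and left ≤ right when it reads
-- nums[left]).  The inner while loop is fuel-bounded: each iteration increments left, and the
-- loop only continues while the deque is nonempty (hence left ≤ right < nums.length), so
-- nums.length + 1 fuel is never exhausted where Python terminates.
def shrinkA (nums : List Int) (k : Int) (right : Nat) :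
    Nat → List Nat × Nat × Int → List Nat × Nat × Int
  | 0, s => s
  | fuel + 1, (w, left, curSum) =>
    match w.getLast? with
    | none => (w, left, curSum)
    | some j0 =>
      if ((right : Int) - (left : Int) + 1) * nums.getD j0 0 - curSum > k then
        let curSum' := curSum - nums.getD left 0
        let w' := if w.getLast? = some left then w.dropLast else w
        shrinkA nums k right fuel (w', left + 1, curSum')
      else (w, left, curSum)

def loopA (nums : List Int) (k : Int) :
    List Int → Nat → List Nat × Nat × Int × Int → List Nat × Nat × Int × Int
  | [], _, s => s
  | num :: rest, right, (w, left, curSum, res) =>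
    let curSum1 := curSum + num
    -- while window and nums[window[-1]] < num: window.pop()  /  window.append(right)
    let w1 := right :: w.dropWhile (fun j => decide (nums.getD j 0 < num))
    let s2 := shrinkA nums k right (nums.length + 1) (w1, left, curSum1)
    let res2 := max res ((right : Int) - (s2.2.1 : Int) + 1)
    loopA nums k rest (right + 1) (s2.1, s2.2.1, s2.2.2, res2)

def solve (nums : List Int) (k : Int) : Int :=
  (loopA nums k nums 0 ([], 0, 0, 0)).2.2.2

-- ===== PORT B =====
-- Brute force: the outer recursion walks the list with index `left` (the suffix at hand IS
-- nums.drop left, so curMax starts at nums[left] = the suffix head); the inner recursion walks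
-- that same suffix with index `right`, maintaining the running max and sum of nums[left..right]
-- and recording every window whose cost (right-left+1)*curMax - curSum is at most k; it stops
-- (Python `break`) at the first window whose cost exceeds k.
def innerB (nums : List Int) (k : Int) (left : Nat) :
    List Int → Nat → Int → Int → Int → Int
  | [], _, _, _, best => best
  | num :: rest, right, curMax, curSum, best =>
    let curMax' := max curMax num
    let curSum' := curSum + num
    if ((right : Int) - (left : Int) + 1) * curMax' - curSum' ≤ k then
      innerB nums k left rest (right + 1) curMax' curSum'
        (max best ((right : Int) - (left : Int) + 1))
    else best

def outerB (nums : List Int) (k : Int) : List Int → Nat → Int → Int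
  | [], _, best => best
  | num :: rest, left, best =>
    outerB nums k rest (left + 1) (innerB nums k left (num :: rest) left num 0 best)

def solve_alt (nums : List Int) (k : Int) : Int :=
  outerB nums k nums 0 0

-- ===== PRECONDITION & SPEC =====
def Spec_solve (nums : List Int) (k : Int) (out : Int) : Prop := out = solve_alt nums k
instance (nums : List Int) (k : Int) (out : Int) : Decidable (Spec_solve nums k out) := by unfold Spec_solve; infer_instance

-- ===== CLAIM (what is proved, stated in full; the proofs are below) =====
def Claim_equal_solve : Prop := ∀ (nums : List Int) (k : Int), Dom_solve nums k → Spec_solve nums k (solve nums k)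

-- ===== LEMMAS AND PROOFS =====

-- window max and prefix-style window sum: wmax l c = max of nums[l..l+c], psum l m = sum of m
-- elements starting at l; cost l c = cost of equalizing the window [l, l+c].
def wmax (nums : List Int) (l : Nat) : Nat → Int
  | 0 => nums.getD l 0
  | c + 1 => max (wmax nums l c) (nums.getD (l + c + 1) 0)

def psum (nums : List Int) (l : Nat) : Nat → Int
  | 0 => 0
  | m + 1 => psum nums l m + nums.getD (l + m) 0

def cost (nums : List Int) (l c : Nat) : Int :=
  ((c : Int) + 1) * wmax nums l c - psum nums l (c + 1)

lemma psum_head (nums : List Int) (l : Nat) :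
    ∀ m : Nat, psum nums l (m + 1) = nums.getD l 0 + psum nums (l + 1) m := by
  intro m
  induction m with
  | zero => simp [psum]
  | succ m ih =>
    have e1 : psum nums l (m + 1 + 1) = psum nums l (m + 1) + nums.getD (l + (m + 1)) 0 := rfl
    have e2 : psum nums (l + 1) (m + 1) = psum nums (l + 1) m + nums.getD (l + 1 + m) 0 := rfl
    have hidx : l + (m + 1) = l + 1 + m := by omega
    rw [e1, ih, e2, hidx]
    ring

lemma wmax_ub (nums : List Int) (l : Nat) :
    ∀ (c j : Nat), l ≤ j → j ≤ l + c → nums.getD j 0 ≤ wmax nums l c := by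
  intro c
  induction c with
  | zero =>
    intro j h1 h2
    have : j = l := by omega
    subst this
    simp [wmax]
  | succ c ih =>
    intro j h1 h2
    have e : wmax nums l (c + 1) = max (wmax nums l c) (nums.getD (l + c + 1) 0) := rfl
    rw [e]
    rcases Nat.lt_or_ge (l + c) j with h | h
    · have : j = l + c + 1 := by omega
      subst this
      exact le_max_right _ _
    · exact le_trans (ih j h1 h) (le_max_left _ _)

lemma wmax_mem (nums : List Int) (l : Nat) :
    ∀ c : Nat, ∃ j, l ≤ j ∧ j ≤ l + c ∧ wmax nums l c = nums.getD j 0 := by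
  intro c
  induction c with
  | zero => exact ⟨l, le_refl l, by omega, rfl⟩
  | succ c ih =>
    have e : wmax nums l (c + 1) = max (wmax nums l c) (nums.getD (l + c + 1) 0) := rfl
    rcases le_total (wmax nums l c) (nums.getD (l + c + 1) 0) with h | h
    · exact ⟨l + c + 1, by omega, by omega, by rw [e, max_eq_right h]⟩
    · obtain ⟨j, h1, h2, h3⟩ := ih
      exact ⟨j, h1, by omega, by rw [e, max_eq_left h]; exact h3⟩

lemma cost_extend (nums : List Int) (l c : Nat) : cost nums l c ≤ cost nums l (c + 1) := by
  have e1 : psum nums l (c + 1 + 1) = psum nums l (c + 1) + nums.getD (l + (c + 1)) 0 := rfl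
  have e2 : wmax nums l (c + 1) = max (wmax nums l c) (nums.getD (l + c + 1) 0) := rfl
  have hidx : l + (c + 1) = l + c + 1 := by omega
  unfold cost
  rw [e1, e2, hidx]
  push_cast
  have hM : wmax nums l c ≤ max (wmax nums l c) (nums.getD (l + c + 1) 0) := le_max_left _ _
  have hy : nums.getD (l + c + 1) 0 ≤ max (wmax nums l c) (nums.getD (l + c + 1) 0) := le_max_right _ _
  have hc : (0 : Int) ≤ (c : Int) + 1 := by positivity
  have hmul : ((c : Int) + 1) * wmax nums l c ≤
      ((c : Int) + 1) * max (wmax nums l c) (nums.getD (l + c + 1) 0) :=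
    mul_le_mul_of_nonneg_left hM hc
  linarith

lemma cost_mono (nums : List Int) (l : Nat) :
    ∀ {c c' : Nat}, c ≤ c' → cost nums l c ≤ cost nums l c' := by
  intro c c' h
  induction h with
  | refl => exact le_refl _
  | step h ih => exact le_trans ih (cost_extend nums l _)

-- ---------- A-side: A's deque loop equals a wmax-based sliding window (lockstep) ----------

-- canonical content of A's deque after processing indices [0, r) with window start `left`:
-- the indices j ∈ [left, r) whose value dominates everything after them (increasing order).
def cW (nums : List Int) (left r : Nat) : List Nat :=
  (List.range r).filter
    (fun j => decide (left ≤ j ∧ ∀ j' < r, j < j' → nums.getD j' 0 ≤ nums.getD j 0))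

lemma mem_cW {nums : List Int} {left r j : Nat} :
    j ∈ cW nums left r ↔
      j < r ∧ left ≤ j ∧ ∀ j' < r, j < j' → nums.getD j' 0 ≤ nums.getD j 0 := by
  simp [cW, List.mem_filter, List.mem_range]

lemma cW_pairwise (nums : List Int) (left r : Nat) : (cW nums left r).Pairwise (· < ·) :=
  (List.pairwise_lt_range).filter _

lemma cW_of_ge {nums : List Int} {left r : Nat} (h : r ≤ left) : cW nums left r = [] := by
  apply List.eq_nil_iff_forall_not_mem.mpr
  intro j hj
  rcases mem_cW.mp hj with ⟨h1, h2, -⟩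
  omega

lemma cW_succ {nums : List Int} {left r : Nat} (h : left ≤ r) :
    cW nums left (r + 1) =
      (cW nums left r).filter (fun j => decide (nums.getD r 0 ≤ nums.getD j 0)) ++ [r] := by
  unfold cW
  rw [List.range_succ, List.filter_append, List.filter_filter]
  congr 1
  · apply List.filter_congr
    intro j hj
    rw [List.mem_range] at hj
    rw [← Bool.decide_and, decide_eq_decide]
    constructor
    · rintro ⟨h1, h2⟩
      exact ⟨h2 r (by omega) hj, h1, fun j' hj' hlt => h2 j' (by omega) hlt⟩
    · rintro ⟨h3, h1, h2⟩
      refine ⟨h1, fun j' hj' hlt => ?_⟩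
      rcases Nat.lt_or_ge j' r with hc | hc
      · exact h2 j' hc hlt
      · have : j' = r := by omega
        subst this; exact h3
  · have hp : left ≤ r ∧ ∀ j' < r + 1, r < j' → nums.getD j' 0 ≤ nums.getD r 0 :=
      ⟨h, fun j' h1 h2 => by omega⟩
    rw [List.filter_singleton, decide_eq_true hp]
    rfl

lemma cW_left_succ (nums : List Int) (left r : Nat) :
    cW nums (left + 1) r = (cW nums left r).filter (fun j => decide (j ≠ left)) := by
  unfold cW
  rw [List.filter_filter]
  apply List.filter_congr
  intro j hj
  rw [← Bool.decide_and, decide_eq_decide]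
  constructor
  · rintro ⟨h1, h2⟩
    exact ⟨by omega, by omega, h2⟩
  · rintro ⟨h3, h1, h2⟩
    exact ⟨by omega, h2⟩

lemma cW_val_antitone (nums : List Int) (left r : Nat) :
    (cW nums left r).Pairwise (fun a b => nums.getD b 0 ≤ nums.getD a 0) := by
  refine List.Pairwise.imp_of_mem ?_ (cW_pairwise nums left r)
  intro a b ha hb hab
  rcases mem_cW.mp ha with ⟨h1, h2, h3⟩
  rcases mem_cW.mp hb with ⟨h4, h5, h6⟩
  exact h3 b h4 hab

-- a dropWhile on a list along which ¬p persists once established is a filter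
lemma dropWhile_eq_filter_of_pairwise {α : Type} (p : α → Bool) :
    ∀ l : List α, l.Pairwise (fun a b => p b = true → p a = true) →
      l.dropWhile p = l.filter (fun x => !p x)
  | [], _ => rfl
  | x :: xs, h => by
    rcases List.pairwise_cons.mp h with ⟨hx, hxs⟩
    by_cases hpx : p x = true
    · rw [List.dropWhile_cons_of_pos hpx, List.filter_cons_of_neg (by simp [hpx]),
        dropWhile_eq_filter_of_pairwise p xs hxs]
    · rw [List.dropWhile_cons_of_neg hpx, List.filter_cons_of_pos (by simp [hpx])]
      congr 1
      symm
      apply List.filter_eq_self.mpr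
      intro y hy
      simp only [Bool.not_eq_true']
      by_contra hc
      simp only [Bool.not_eq_false] at hc
      exact hpx (hx y hy hc)

-- pushing index r: pop the back while values < nums[r], then append r (back-first lists)
lemma cW_push {nums : List Int} {left r : Nat} (h : left ≤ r) :
    r :: ((cW nums left r).reverse.dropWhile (fun j => decide (nums.getD j 0 < nums.getD r 0))) =
      (cW nums left (r + 1)).reverse := by
  rw [cW_succ h, List.reverse_append]
  have hpw : ((cW nums left r).reverse).Pairwise
      (fun a b => (decide (nums.getD b 0 < nums.getD r 0)) = true →
        (decide (nums.getD a 0 < nums.getD r 0)) = true) := by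
    rw [List.pairwise_reverse]
    refine (cW_val_antitone nums left r).imp ?_
    intro a b hab
    simp only [decide_eq_true_eq]
    omega
  rw [dropWhile_eq_filter_of_pairwise _ _ hpw, List.filter_reverse]
  have : (fun x => !decide (nums.getD x 0 < nums.getD r 0)) =
      (fun j => decide (nums.getD r 0 ≤ nums.getD j 0)) := by
    funext j
    rw [← decide_not, decide_eq_decide]
    exact not_lt
  rw [this]
  rfl

lemma cW_head (nums : List Int) {left right : Nat} (hlr : left ≤ right) :
    ∃ h t, cW nums left (right + 1) = h :: t ∧
      nums.getD h 0 = wmax nums left (right - left) := by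
  obtain ⟨j0, hj1, hj2, hj4⟩ := wmax_mem nums left (right - left)
  have hj0 : j0 ∈ cW nums left (right + 1) := by
    refine mem_cW.mpr ⟨by omega, hj1, fun j' hj' hlt => ?_⟩
    have h1 : nums.getD j' 0 ≤ wmax nums left (right - left) :=
      wmax_ub nums left (right - left) j' (by omega) (by omega)
    rw [hj4] at h1
    exact h1
  cases hcw : cW nums left (right + 1) with
  | nil => rw [hcw] at hj0; exact absurd hj0 List.not_mem_nil
  | cons h t =>
    refine ⟨h, t, rfl, ?_⟩
    have hhmem : h ∈ cW nums left (right + 1) := by rw [hcw]; exact List.mem_cons_self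
    rcases mem_cW.mp hhmem with ⟨hh1, hh2, hh3⟩
    have hhle : nums.getD h 0 ≤ wmax nums left (right - left) :=
      wmax_ub nums left (right - left) h hh2 (by omega)
    have hpw := cW_pairwise nums left (right + 1)
    rw [hcw, List.pairwise_cons] at hpw
    have hle2 : h ≤ j0 := by
      rw [hcw] at hj0
      rcases List.mem_cons.mp hj0 with hq | hq
      · omega
      · exact le_of_lt (hpw.1 _ hq)
    rcases Nat.eq_or_lt_of_le hle2 with hq | hq
    · rw [hq]; exact hj4.symm
    · have := hh3 j0 (by omega) hq
      omega

lemma cW_tail {nums : List Int} {left r : Nat} {t : List Nat}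
    (h : cW nums left r = left :: t) : cW nums (left + 1) r = t := by
  rw [cW_left_succ, h, List.filter_cons_of_neg (by simp)]
  apply List.filter_eq_self.mpr
  intro y hy
  have hpw := cW_pairwise nums left r
  rw [h, List.pairwise_cons] at hpw
  have : left < y := hpw.1 _ hy
  simp only [decide_eq_true_eq]
  omega

lemma cW_keep {nums : List Int} {left r h0 : Nat} {t : List Nat}
    (hcw : cW nums left r = h0 :: t) (hne : h0 ≠ left) :
    cW nums (left + 1) r = cW nums left r := by
  rw [cW_left_succ]
  apply List.filter_eq_self.mpr
  intro y hy
  suffices hne2 : y ≠ left by simp [hne2]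
  intro hyl
  subst hyl
  have hpw := cW_pairwise nums y r
  rw [hcw, List.pairwise_cons] at hpw
  rcases List.mem_cons.mp (hcw ▸ hy) with hq | hq
  · exact hne hq.symm
  · have h1 : h0 < y := hpw.1 _ hq
    have hmem : h0 ∈ cW nums y r := by rw [hcw]; exact List.mem_cons_self
    rcases mem_cW.mp hmem with ⟨-, h2, -⟩
    omega

-- proof-side sliding window: A's loop with the deque replaced by the window max wmax
def shrinkM (nums : List Int) (k : Int) (right : Nat) :
    Nat → Nat × Int → Nat × Int
  | 0, s => s
  | fuel + 1, (left, curSum) =>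
    if left ≤ right ∧
        ((right : Int) - (left : Int) + 1) * wmax nums left (right - left) - curSum > k then
      shrinkM nums k right fuel (left + 1, curSum - nums.getD left 0)
    else (left, curSum)

def loopM (nums : List Int) (k : Int) :
    List Int → Nat → Nat × Int × Int → Nat × Int × Int
  | [], _, s => s
  | num :: rest, right, (left, curSum, res) =>
    let curSum1 := curSum + num
    let s2 := shrinkM nums k right (nums.length + 1) (left, curSum1)
    let res2 := max res ((right : Int) - (s2.1 : Int) + 1)
    loopM nums k rest (right + 1) (s2.1, s2.2, res2)

lemma shrink_lockstep (nums : List Int) (k : Int) (right : Nat) :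
    ∀ (fuel left : Nat) (curSum : Int), left ≤ right + 1 →
      (shrinkM nums k right fuel (left, curSum)).1 ≤ right + 1 ∧
      shrinkA nums k right fuel ((cW nums left (right + 1)).reverse, left, curSum) =
        ((cW nums (shrinkM nums k right fuel (left, curSum)).1 (right + 1)).reverse,
          shrinkM nums k right fuel (left, curSum)) := by
  intro fuel
  induction fuel with
  | zero =>
    intro left curSum hle
    exact ⟨hle, rfl⟩
  | succ fuel ih =>
    intro left curSum hle
    by_cases hlr : left ≤ right
    · obtain ⟨h, t, hcw, hval⟩ := cW_head nums hlr
      have hgl : ((cW nums left (right + 1)).reverse).getLast? = some h := by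
        rw [hcw, List.getLast?_reverse]; rfl
      by_cases hc : ((right : Int) - (left : Int) + 1) * nums.getD h 0 - curSum > k
      · -- both loops take a step
        have hstepM : shrinkM nums k right (fuel + 1) (left, curSum) =
            shrinkM nums k right fuel (left + 1, curSum - nums.getD left 0) := by
          simp only [shrinkM]
          rw [if_pos ⟨hlr, by rw [← hval]; exact hc⟩]
        have hstepA : shrinkA nums k right (fuel + 1)
              ((cW nums left (right + 1)).reverse, left, curSum) =
            shrinkA nums k right fuel
              ((cW nums (left + 1) (right + 1)).reverse, left + 1, curSum - nums.getD left 0) := by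
          simp only [shrinkA, hgl]
          rw [if_pos hc]
          by_cases hh : h = left
          · subst hh
            rw [if_pos rfl, hcw]
            have : ((h :: t).reverse).dropLast = t.reverse := by
              rw [List.reverse_cons, List.dropLast_concat]
            rw [this, cW_tail hcw]
          · rw [if_neg (fun hq => hh (Option.some.inj hq)),
              cW_keep hcw hh]
        rw [hstepA, hstepM]
        exact ih (left + 1) (curSum - nums.getD left 0) (by omega)
      · -- both loops stop
        have hstopM : shrinkM nums k right (fuel + 1) (left, curSum) = (left, curSum) := by
          simp only [shrinkM]
          rw [if_neg (fun hq => hc (by rw [hval]; exact hq.2))]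
        have hstopA : shrinkA nums k right (fuel + 1)
              ((cW nums left (right + 1)).reverse, left, curSum) =
            ((cW nums left (right + 1)).reverse, left, curSum) := by
          simp only [shrinkA, hgl]
          rw [if_neg hc]
        rw [hstopA, hstopM]
        exact ⟨by omega, rfl⟩
    · -- left = right + 1 : empty window, both loops stop immediately
      have hcw : cW nums left (right + 1) = [] := cW_of_ge (by omega)
      have hstopM : shrinkM nums k right (fuel + 1) (left, curSum) = (left, curSum) := by
        simp only [shrinkM]
        rw [if_neg (fun hq => hlr hq.1)]
      have hstopA : shrinkA nums k right (fuel + 1)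
            ((cW nums left (right + 1)).reverse, left, curSum) =
          ((cW nums left (right + 1)).reverse, left, curSum) := by
        have hgl : ((cW nums left (right + 1)).reverse).getLast? = none := by
          rw [hcw]; rfl
        simp only [shrinkA, hgl]
      rw [hstopA, hstopM]
      exact ⟨by omega, rfl⟩

lemma loop_lockstep (nums : List Int) (k : Int) :
    ∀ (rest : List Int) (r left : Nat) (curSum res : Int),
      nums.drop r = rest → left ≤ r →
      (loopA nums k rest r ((cW nums left r).reverse, left, curSum, res)).2 =
        loopM nums k rest r (left, curSum, res) := by
  intro rest
  induction rest with
  | nil => intro r left curSum res hdrop hle; rfl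
  | cons num rest' ih =>
    intro r left curSum res hdrop hle
    have hr : r < nums.length := by
      have := congrArg List.length hdrop
      simp only [List.length_drop, List.length_cons] at this
      omega
    have hnum : nums.getD r 0 = num := by
      have h0 : (nums.drop r)[0]? = some num := by rw [hdrop]; rfl
      rw [List.getElem?_drop] at h0
      rw [List.getD_eq_getElem?_getD]
      simp only [Nat.add_zero] at h0
      rw [h0]
      rfl
    have hdrop' : nums.drop (r + 1) = rest' := by
      rw [← List.drop_drop, hdrop]
      rfl
    simp only [loopA, loopM]
    rw [← hnum, cW_push hle]
    obtain ⟨hsh1, hsh2⟩ :=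
      shrink_lockstep nums k r (nums.length + 1) left (curSum + nums.getD r 0) (by omega)
    rw [hsh2]
    exact ih (r + 1) (shrinkM nums k r (nums.length + 1) (left, curSum + nums.getD r 0)).1
      (shrinkM nums k r (nums.length + 1) (left, curSum + nums.getD r 0)).2 _ hdrop' hsh1

lemma solve_eq_loopM (nums : List Int) (k : Int) :
    solve nums k = (loopM nums k nums 0 (0, 0, 0)).2.2 := by
  have h := loop_lockstep nums k nums 0 0 0 0 rfl (Nat.le_refl 0)
  have hcw : cW nums 0 0 = [] := rfl
  rw [hcw] at h
  exact congrArg (fun s => s.2.2) h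

-- ---------- the sliding window computes the max window length with cost ≤ k ----------

lemma shrinkM_spec (nums : List Int) (k : Int) (right : Nat) :
    ∀ (fuel left : Nat) (curSum : Int),
      left ≤ right + 1 →
      curSum = psum nums left (right + 1 - left) →
      (∀ l', l' < left → k < cost nums l' (right - l')) →
      right + 1 - left < fuel →
      left ≤ (shrinkM nums k right fuel (left, curSum)).1 ∧
      (shrinkM nums k right fuel (left, curSum)).1 ≤ right + 1 ∧
      (shrinkM nums k right fuel (left, curSum)).2 =
        psum nums (shrinkM nums k right fuel (left, curSum)).1
          (right + 1 - (shrinkM nums k right fuel (left, curSum)).1) ∧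
      (∀ l', l' < (shrinkM nums k right fuel (left, curSum)).1 →
        k < cost nums l' (right - l')) ∧
      ((shrinkM nums k right fuel (left, curSum)).1 ≤ right →
        cost nums (shrinkM nums k right fuel (left, curSum)).1
          (right - (shrinkM nums k right fuel (left, curSum)).1) ≤ k) := by
  intro fuel
  induction fuel with
  | zero =>
    intro left curSum h1 h2 h3 h4
    omega
  | succ fuel ih =>
    intro left curSum h1 h2 h3 h4
    by_cases hlr : left ≤ right
    · have hcnt : right + 1 - left = (right - left) + 1 := by omega
      have hcast : ((right : Int) - (left : Int) + 1) = ((right - left : Nat) : Int) + 1 := by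
        omega
      have hcond : (((right : Int) - (left : Int) + 1) * wmax nums left (right - left) - curSum)
          = cost nums left (right - left) := by
        rw [h2, hcnt, hcast, cost]
      by_cases hc : k < cost nums left (right - left)
      · have hstep : shrinkM nums k right (fuel + 1) (left, curSum) =
            shrinkM nums k right fuel (left + 1, curSum - nums.getD left 0) := by
          simp only [shrinkM]
          rw [if_pos ⟨hlr, by rw [hcond]; exact hc⟩]
        have hsum' : curSum - nums.getD left 0 = psum nums (left + 1) (right + 1 - (left + 1)) := by
          have hh := psum_head nums left (right - left)
          have : right + 1 - (left + 1) = right - left := by omega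
          rw [this]
          rw [h2, hcnt] at *
          omega
        have hinf' : ∀ l', l' < left + 1 → k < cost nums l' (right - l') := by
          intro l' hl'
          rcases Nat.lt_or_ge l' left with hq | hq
          · exact h3 l' hq
          · have : l' = left := by omega
            subst this
            exact hc
        rw [hstep]
        obtain ⟨r1, r2, r3, r4, r5⟩ :=
          ih (left + 1) (curSum - nums.getD left 0) (by omega) hsum' hinf' (by omega)
        exact ⟨le_trans (Nat.le_succ left) r1, r2, r3, r4, r5⟩
      · have hstop : shrinkM nums k right (fuel + 1) (left, curSum) = (left, curSum) := by
          simp only [shrinkM]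
          rw [if_neg (fun hq => hc (by rw [← hcond]; exact hq.2))]
        rw [hstop]
        refine ⟨le_refl _, ?_, h2, h3, fun _ => ?_⟩
        · show left ≤ right + 1
          omega
        · show cost nums left (right - left) ≤ k
          omega
    · have hstop : shrinkM nums k right (fuel + 1) (left, curSum) = (left, curSum) := by
        simp only [shrinkM]
        rw [if_neg (fun hq => hlr hq.1)]
      rw [hstop]
      exact ⟨le_refl _, h1, h2, h3, fun hq => absurd hq hlr⟩

lemma loopM_spec (nums : List Int) (k : Int) :
    ∀ (rest : List Int) (right left : Nat) (curSum res : Int),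
      rest = nums.drop right →
      left ≤ right →
      curSum = psum nums left (right - left) →
      (∀ l', l' < left → k < cost nums l' (right - 1 - l')) →
      0 ≤ res →
      (res = 0 ∨ ∃ l c, l + c < nums.length ∧ cost nums l c ≤ k ∧ res = (c : Int) + 1) →
      res ≤ (loopM nums k rest right (left, curSum, res)).2.2 ∧
      0 ≤ (loopM nums k rest right (left, curSum, res)).2.2 ∧
      (∀ l c, right ≤ l + c → l + c < nums.length → cost nums l c ≤ k →
        (c : Int) + 1 ≤ (loopM nums k rest right (left, curSum, res)).2.2) ∧
      ((loopM nums k rest right (left, curSum, res)).2.2 = 0 ∨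
        ∃ l c, l + c < nums.length ∧ cost nums l c ≤ k ∧
          (loopM nums k rest right (left, curSum, res)).2.2 = (c : Int) + 1) := by
  intro rest
  induction rest with
  | nil =>
    intro right left curSum res hdrop hle hsum hinf hres hcand
    have hn : nums.length ≤ right := by
      have := congrArg List.length hdrop.symm
      simp only [List.length_drop, List.length_nil] at this
      omega
    refine ⟨le_refl _, hres, fun l c h1 h2 h3 => by omega, hcand⟩
  | cons num rest' ih =>
    intro right left curSum res hdrop hle hsum hinf hres hcand
    have hr : right < nums.length := by
      have := congrArg List.length hdrop.symm
      simp only [List.length_drop, List.length_cons] at this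
      omega
    have hnum : nums.getD right 0 = num := by
      have h0 : (nums.drop right)[0]? = some num := by rw [← hdrop]; rfl
      rw [List.getElem?_drop] at h0
      rw [List.getD_eq_getElem?_getD]
      simp only [Nat.add_zero] at h0
      rw [h0]
      rfl
    have hdrop' : rest' = nums.drop (right + 1) := by
      have h1 := congrArg List.tail hdrop
      rwa [List.tail_drop] at h1
    have hsum1 : curSum + num = psum nums left (right + 1 - left) := by
      have e : psum nums left ((right - left) + 1) =
          psum nums left (right - left) + nums.getD (left + (right - left)) 0 := rfl
      have hidx : left + (right - left) = right := by omega
      have hcnt : right + 1 - left = (right - left) + 1 := by omega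
      rw [hcnt, e, hidx, hnum, hsum]
    have hinf1 : ∀ l', l' < left → k < cost nums l' (right - l') := by
      intro l' hl'
      have h1 := hinf l' hl'
      have h2 : cost nums l' (right - 1 - l') ≤ cost nums l' (right - l') := by
        apply cost_mono
        omega
      omega
    obtain ⟨hs1, hs2, hs3, hs4, hs5⟩ :=
      shrinkM_spec nums k right (nums.length + 1) left (curSum + num) (by omega) hsum1 hinf1
        (by omega)
    set L := (shrinkM nums k right (nums.length + 1) (left, curSum + num)).1 with hL
    set S := (shrinkM nums k right (nums.length + 1) (left, curSum + num)).2 with hS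
    set res2 := max res ((right : Int) - (L : Int) + 1) with hres2
    have hres2_nonneg : 0 ≤ res2 := le_trans hres (le_max_left _ _)
    have hres2_cand : res2 = 0 ∨
        ∃ l c, l + c < nums.length ∧ cost nums l c ≤ k ∧ res2 = (c : Int) + 1 := by
      rcases max_choice res ((right : Int) - (L : Int) + 1) with hm | hm
      · rw [hres2, hm]; exact hcand
      · rcases Nat.lt_or_ge right L with hq | hq
        · have : ((right : Int) - (L : Int) + 1) ≤ 0 := by omega
          have : res2 ≤ res := by rw [hres2, hm]; omega
          have : res2 = res := le_antisymm this (le_max_left _ _)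
          rw [this]; exact hcand
        · right
          refine ⟨L, right - L, by omega, hs5 hq, ?_⟩
          rw [hres2, hm]
          omega
    have hstep : loopM nums k (num :: rest') right (left, curSum, res) =
        loopM nums k rest' (right + 1) (L, S, res2) := rfl
    rw [hstep]
    obtain ⟨ih1, ih2, ih3, ih4⟩ :=
      ih (right + 1) L S res2 hdrop' (by omega)
        (by rw [hs3]; ) (by intro l' hl'; simpa using hs4 l' hl') hres2_nonneg hres2_cand
    refine ⟨le_trans (le_max_left _ _) ih1, ih2, ?_, ih4⟩
    intro l c h1 h2 h3
    rcases Nat.lt_or_ge (l + c) (right + 1) with hq | hq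
    · -- window ends exactly at right
      have hend : l + c = right := by omega
      have hLl : L ≤ l := by
        by_contra hq2
        have := hs4 l (by omega)
        have hceq : right - l = c := by omega
        rw [hceq] at this
        omega
      have hlen : (c : Int) + 1 ≤ (right : Int) - (L : Int) + 1 := by omega
      have : (c : Int) + 1 ≤ res2 := le_trans hlen (le_max_right _ _)
      exact le_trans this ih1
    · exact ih3 l c hq h2 h3

-- ---------- the brute force computes the same maximum ----------

lemma innerB_spec (nums : List Int) (k : Int) (left : Nat) :
    ∀ (rest : List Int) (j : Nat) (curMax curSum best : Int),
      rest = nums.drop (left + j) →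
      max curMax (nums.getD (left + j) 0) = wmax nums left j →
      curSum = psum nums left j →
      best ≤ innerB nums k left rest (left + j) curMax curSum best ∧
      (∀ c, j ≤ c → left + c < nums.length → cost nums left c ≤ k →
        (c : Int) + 1 ≤ innerB nums k left rest (left + j) curMax curSum best) ∧
      (innerB nums k left rest (left + j) curMax curSum best = best ∨
        ∃ c, left + c < nums.length ∧ cost nums left c ≤ k ∧
          innerB nums k left rest (left + j) curMax curSum best = (c : Int) + 1) := by
  intro rest
  induction rest with
  | nil =>
    intro j curMax curSum best hdrop hmax hsum
    have hn : nums.length ≤ left + j := by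
      have := congrArg List.length hdrop.symm
      simp only [List.length_drop, List.length_nil] at this
      omega
    exact ⟨le_refl _, fun c h1 h2 h3 => by omega, Or.inl rfl⟩
  | cons num rest' ih =>
    intro j curMax curSum best hdrop hmax hsum
    have hnum : nums.getD (left + j) 0 = num := by
      have h0 : (nums.drop (left + j))[0]? = some num := by rw [← hdrop]; rfl
      rw [List.getElem?_drop] at h0
      rw [List.getD_eq_getElem?_getD]
      simp only [Nat.add_zero] at h0
      rw [h0]
      rfl
    have hlen : left + j < nums.length := by
      have := congrArg List.length hdrop.symm
      simp only [List.length_drop, List.length_cons] at this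
      omega
    have hdrop' : rest' = nums.drop (left + (j + 1)) := by
      have h1 := congrArg List.tail hdrop
      rwa [List.tail_drop] at h1
    have hmax' : max curMax num = wmax nums left j := by rw [← hnum]; exact hmax
    have hsum' : curSum + num = psum nums left (j + 1) := by
      have e : psum nums left (j + 1) = psum nums left j + nums.getD (left + j) 0 := rfl
      rw [e, hnum, hsum]
    have hmax'' : max (max curMax num) (nums.getD (left + (j + 1)) 0) = wmax nums left (j + 1) := by
      have e : wmax nums left (j + 1) = max (wmax nums left j) (nums.getD (left + j + 1) 0) := rfl
      rw [e, ← hmax', Nat.add_assoc]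
    have hcast : ((left + j : Nat) : Int) - (left : Int) + 1 = (j : Int) + 1 := by
      push_cast; ring
    have hcond : (((left + j : Nat) : Int) - (left : Int) + 1) * max curMax num - (curSum + num)
        = cost nums left j := by
      rw [hcast, hmax', hsum', cost]
    by_cases hif : (((left + j : Nat) : Int) - (left : Int) + 1) * max curMax num -
        (curSum + num) ≤ k
    · -- the window [left, left+j] is feasible: record it and keep scanning
      set best' := max best (((left + j : Nat) : Int) - (left : Int) + 1) with hbest'
      have hstep : innerB nums k left (num :: rest') (left + j) curMax curSum best =
          innerB nums k left rest' (left + (j + 1)) (max curMax num) (curSum + num) best' := by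
        simp only [innerB]
        rw [if_pos hif, ← hbest']
        rfl
      have hbb : best ≤ best' := le_max_left _ _
      obtain ⟨ih1, ih2, ih3⟩ :=
        ih (j + 1) (max curMax num) (curSum + num) best' hdrop' hmax'' hsum'
      rw [hstep]
      refine ⟨le_trans hbb ih1, ?_, ?_⟩
      · intro c h1 h2 h3
        rcases Nat.eq_or_lt_of_le h1 with hq | hq
        · have hcj : c = j := hq.symm
          subst hcj
          have hle : (c : Int) + 1 ≤ best' := by
            rw [hbest', hcast]
            exact le_max_right _ _
          exact le_trans hle ih1
        · exact ih2 c hq h2 h3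
      · rcases ih3 with hq | hq
        · rw [hq, hbest']
          rcases max_choice best (((left + j : Nat) : Int) - (left : Int) + 1) with hm | hm
          · rw [hm]; exact Or.inl rfl
          · right
            refine ⟨j, hlen, by rw [← hcond]; exact hif, by rw [hm, hcast]⟩
        · exact Or.inr hq
    · -- the window [left, left+j] already exceeds k: every longer window does too (cost_mono)
      have hstop : innerB nums k left (num :: rest') (left + j) curMax curSum best = best := by
        simp only [innerB]
        rw [if_neg hif]
      rw [hstop]
      refine ⟨le_refl _, ?_, Or.inl rfl⟩
      intro c h1 h2 h3
      exfalso
      rw [hcond] at hif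
      exact hif (le_trans (cost_mono nums left h1) h3)

lemma outerB_spec (nums : List Int) (k : Int) :
    ∀ (rest : List Int) (left : Nat) (best : Int),
      rest = nums.drop left →
      0 ≤ best →
      (best = 0 ∨ ∃ l c, l + c < nums.length ∧ cost nums l c ≤ k ∧ best = (c : Int) + 1) →
      0 ≤ outerB nums k rest left best ∧
      best ≤ outerB nums k rest left best ∧
      (∀ l c, left ≤ l → l + c < nums.length → cost nums l c ≤ k →
        (c : Int) + 1 ≤ outerB nums k rest left best) ∧
      (outerB nums k rest left best = 0 ∨
        ∃ l c, l + c < nums.length ∧ cost nums l c ≤ k ∧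
          outerB nums k rest left best = (c : Int) + 1) := by
  intro rest
  induction rest with
  | nil =>
    intro left best hdrop hb hcand
    have hn : nums.length ≤ left := by
      have := congrArg List.length hdrop.symm
      simp only [List.length_drop, List.length_nil] at this
      omega
    exact ⟨hb, le_refl _, fun l c h1 h2 h3 => by omega, hcand⟩
  | cons num rest' ih =>
    intro left best hdrop hb hcand
    have hnum : nums.getD left 0 = num := by
      have h0 : (nums.drop left)[0]? = some num := by rw [← hdrop]; rfl
      rw [List.getElem?_drop] at h0
      rw [List.getD_eq_getElem?_getD]
      simp only [Nat.add_zero] at h0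
      rw [h0]
      rfl
    have hdrop0 : num :: rest' = nums.drop (left + 0) := hdrop
    have hmax0 : max num (nums.getD (left + 0) 0) = wmax nums left 0 := by
      have e : wmax nums left 0 = nums.getD left 0 := rfl
      have e2 : left + 0 = left := rfl
      rw [e, e2, hnum, max_self]
    have hsum0 : (0 : Int) = psum nums left 0 := rfl
    obtain ⟨in1, in2, in3⟩ :=
      innerB_spec nums k left (num :: rest') 0 num 0 best hdrop0 hmax0 hsum0
    set best1 := innerB nums k left (num :: rest') (left + 0) num 0 best with hbest1
    have hdrop' : rest' = nums.drop (left + 1) := by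
      have h1 := congrArg List.tail hdrop
      rwa [List.tail_drop] at h1
    have hb1 : 0 ≤ best1 := le_trans hb in1
    have hcand1 : best1 = 0 ∨
        ∃ l c, l + c < nums.length ∧ cost nums l c ≤ k ∧ best1 = (c : Int) + 1 := by
      rcases in3 with hq | hq
      · rw [hq]; exact hcand
      · obtain ⟨c, h1, h2, h3⟩ := hq
        exact Or.inr ⟨left, c, h1, h2, h3⟩
    have hstep : outerB nums k (num :: rest') left best =
        outerB nums k rest' (left + 1) best1 := rfl
    rw [hstep]
    obtain ⟨ih1, ih2, ih3, ih4⟩ := ih (left + 1) best1 hdrop' hb1 hcand1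
    refine ⟨ih1, le_trans (le_trans in1 ih2) (le_refl _), ?_, ih4⟩
    intro l c h1 h2 h3
    rcases Nat.eq_or_lt_of_le h1 with hq | hq
    · subst hq
      exact le_trans (in2 c (Nat.zero_le c) h2 h3) ih2
    · exact ih3 l c hq h2 h3

-- ===== VERDICT (by name: the statement is the Claim_ definition above) =====
theorem solve_spec : Claim_equal_solve := by
  intro nums k _
  unfold Spec_solve
  obtain ⟨a1, a2, a3, a4⟩ :=
    loopM_spec nums k nums 0 0 0 0 rfl (le_refl 0) rfl (fun l' hl' => by omega) (le_refl 0)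
      (Or.inl rfl)
  obtain ⟨b1, b2, b3, b4⟩ :=
    outerB_spec nums k nums 0 0 rfl (le_refl 0) (Or.inl rfl)
  rw [solve_eq_loopM]
  unfold solve_alt
  apply le_antisymm
  · rcases a4 with hq | ⟨l, c, h1, h2, h3⟩
    · rw [hq]; exact b1
    · rw [h3]; exact b3 l c (Nat.zero_le l) h1 h2
  · rcases b4 with hq | ⟨l, c, h1, h2, h3⟩
    · rw [hq]; exact a2
    · rw [h3]; exact a3 l c (Nat.zero_le _) h1 h2
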